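-- pv_equiv track=rewrite | github.com/ciur/papermerge-worker | pmworker/pdftk.py | cat_ranges_for_delete
-- ===== SOURCE A (Python) =====
-- def cat_ranges_for_delete(page_count, page_numbers):
--     """
--     Returns a list of integers. Each number in the list
--     is the number of page which will 'stay' in document.
--     In other words, it returns a list with deleted pages.
--
--     Examples:
--
--
--     If document has 22 pages (page_count=22) and page number 21 is to be
--     deleted (i.e page_numbers = [21]) will return
--
--         [1, 2, 3, 4, ..., 19, 20, 22]
--
--     If page number 1 is to be deleted:
--
--         [2, 3, 4, ..., 22] list will be returned.
--
--     If page number is 22 is to be deleted: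
--
--         [1, 2, 3,..., 21] will be returned.
--
--     With  page_numbers=[1, 7, 10] and page_count=22 result
--     will be:
--
--         (2, 3, 4, 5, 6, 8, 9, 11, 12 , 13, ..., 22)
--
--
--     page_numbers is a list of page numbers (starting with 1).
--     """
--     results = []
--
--     for check in page_numbers:
--         if not isinstance(check, int):
--             err_msg = "page_numbers must be a list of strings"
--             raise ValueError(err_msg)
--
--     for number in range(1, page_count + 1):
--         if number not in page_numbers:
--             results.append(number)
--
--     return results
-- ===== SOURCE B (Python) =====
-- def cat_ranges_for_delete(page_count, page_numbers):
--     for check in page_numbers: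
--         if not isinstance(check, int):
--             err_msg = "page_numbers must be a list of strings"
--             raise ValueError(err_msg)
--     # Gap-based construction: walk the sorted distinct deletions and emit the
--     # whole runs of kept pages between consecutive deletions, never testing
--     # membership of individual pages.
--     results = []
--     start = 1
--     for d in sorted(set(page_numbers)):
--         if d > page_count:
--             break
--         if d >= start:
--             results.extend(range(start, d))
--             start = d + 1
--     results.extend(range(start, page_count + 1))
--     return results
-- ===== Notes on version B (the rewrite author's own statement) =====
-- stated objective: faster
-- what changed: Instead of scanning every page 1..n and testing membership in page_numbers, B sorts the distinct deletions and emits the whole runs of kept pages between consecutive deletions (a gap-merge pass), so no per-page membership test exists at all.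
import Mathlib
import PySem

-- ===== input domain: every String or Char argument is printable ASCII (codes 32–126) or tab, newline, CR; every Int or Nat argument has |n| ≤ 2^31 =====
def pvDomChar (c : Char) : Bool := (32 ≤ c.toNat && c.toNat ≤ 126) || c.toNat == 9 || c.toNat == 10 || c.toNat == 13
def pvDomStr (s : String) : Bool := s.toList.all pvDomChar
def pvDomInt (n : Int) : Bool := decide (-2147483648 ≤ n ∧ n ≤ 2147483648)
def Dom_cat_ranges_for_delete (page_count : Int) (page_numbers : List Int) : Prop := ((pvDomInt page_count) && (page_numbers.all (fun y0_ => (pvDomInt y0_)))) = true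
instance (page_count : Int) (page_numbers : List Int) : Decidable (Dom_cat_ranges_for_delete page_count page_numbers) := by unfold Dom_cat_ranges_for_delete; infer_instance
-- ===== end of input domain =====

-- ===== PORT A =====
-- B replaces A's per-page membership scan with a gap-merge over the sorted distinct
-- deletions, emitting whole runs of kept pages (objective: faster).
-- Port of A. The isinstance validation loop always passes here (every element of List Int
-- is an int), so it is a no-op.
def cat_ranges_for_delete (page_count : Int) (page_numbers : List Int) : List Int :=
  (PySem.List.pyRange 1 (page_count + 1)).foldl
    (fun results number => if number ∉ page_numbers then results ++ [number] else results) []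

-- ===== PORT B =====
-- B's loop over sorted(set(page_numbers)) with break and a moving 'start'; the
-- 'results.extend(range(...))' appends become list concatenations of pyRange blocks.
def catLoop (page_count : Int) : List Int → Int → List Int
  | [], start => PySem.List.pyRange start (page_count + 1)
  | d :: ds, start =>
    if page_count < d then PySem.List.pyRange start (page_count + 1)       -- break, then final extend
    else if start ≤ d then PySem.List.pyRange start d ++ catLoop page_count ds (d + 1)
    else catLoop page_count ds start

def cat_ranges_for_delete_alt (page_count : Int) (page_numbers : List Int) : List Int :=
  catLoop page_count (PySem.List.sorted (PySem.Set.ofList page_numbers) (fun x => x)) 1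

-- ===== PRECONDITION & SPEC =====
def Spec_cat_ranges_for_delete (page_count : Int) (page_numbers : List Int) (out : List Int) : Prop := out = cat_ranges_for_delete_alt page_count page_numbers
instance (page_count : Int) (page_numbers : List Int) (out : List Int) : Decidable (Spec_cat_ranges_for_delete page_count page_numbers out) := by unfold Spec_cat_ranges_for_delete; infer_instance

-- ===== CLAIM (what is proved, stated in full; the proofs are below) =====
def Claim_equal_cat_ranges_for_delete : Prop := ∀ (page_count : Int) (page_numbers : List Int), Dom_cat_ranges_for_delete page_count page_numbers → Spec_cat_ranges_for_delete page_count page_numbers (cat_ranges_for_delete page_count page_numbers)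

-- ===== LEMMAS AND PROOFS =====

-- On a strictly increasing deletion list, the gap-merge loop computes exactly the
-- filtered range that A's scan produces.
lemma catLoop_eq_filter (pc : Int) (ds : List Int) :
    ∀ start : Int, List.Pairwise (· < ·) ds →
    catLoop pc ds start
      = (PySem.List.pyRange start (pc + 1)).filter (fun x => decide (x ∉ ds)) := by
  induction ds with
  | nil =>
    intro start _
    simp [catLoop]
  | cons d ds ih =>
    intro start hpw
    have hd : ∀ y ∈ ds, d < y := fun y hy => (List.pairwise_cons.mp hpw).1 y hy
    have hpw' := (List.pairwise_cons.mp hpw).2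
    by_cases hbr : pc < d
    · -- break: no element of the range can belong to d :: ds
      have : ∀ x ∈ PySem.List.pyRange start (pc + 1), decide (x ∉ d :: ds) = true := by
        intro x hx
        have hx' := PySem.List.mem_pyRange_one.mp hx
        simp only [decide_eq_true_eq, List.mem_cons, not_or]
        constructor
        · omega
        · intro hxds; have := hd x hxds; omega
      rw [List.filter_eq_self.mpr this]
      simp [catLoop, hbr]
    · rw [not_lt] at hbr
      by_cases hge : start ≤ d
      · -- emit range(start, d), skip d, continue from d+1
        have hsplit : PySem.List.pyRange start (pc + 1)
            = PySem.List.pyRange start d ++ PySem.List.pyRange d (pc + 1) :=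
          PySem.List.pyRange_one_append start d (pc + 1) hge (by omega)
        have hdcons : PySem.List.pyRange d (pc + 1) = d :: PySem.List.pyRange (d + 1) (pc + 1) :=
          PySem.List.pyRange_one_cons (by omega)
        have h1 : ∀ x ∈ PySem.List.pyRange start d, decide (x ∉ d :: ds) = true := by
          intro x hx
          have hx' := PySem.List.mem_pyRange_one.mp hx
          simp only [decide_eq_true_eq, List.mem_cons, not_or]
          exact ⟨by omega, fun hxds => by have := hd x hxds; omega⟩
        have h2 : ∀ x ∈ PySem.List.pyRange (d + 1) (pc + 1),
            decide (x ∉ d :: ds) = decide (x ∉ ds) := by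
          intro x hx
          have hx' := PySem.List.mem_pyRange_one.mp hx
          simp only [List.mem_cons]
          have : ¬ x = d := by omega
          simp [this]
        rw [hsplit, hdcons, List.filter_append, List.filter_eq_self.mpr h1,
            List.filter_cons]
        rw [show (decide (d ∉ d :: ds)) = false by simp, if_neg (by simp)]
        rw [List.filter_congr h2, ← ih (d + 1) hpw']
        simp [catLoop, show ¬ pc < d by omega, hge]
      · -- d < start: d never occurs in the remaining range
        rw [not_le] at hge
        have h2 : ∀ x ∈ PySem.List.pyRange start (pc + 1),
            decide (x ∉ d :: ds) = decide (x ∉ ds) := by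
          intro x hx
          have hx' := PySem.List.mem_pyRange_one.mp hx
          have : ¬ x = d := by omega
          simp [this]
        rw [List.filter_congr h2, ← ih start hpw']
        simp [catLoop, show ¬ pc < d by omega, show ¬ start ≤ d by omega]

-- ===== VERDICT (by name: the statement is the Claim_ definition above) =====
theorem cat_ranges_for_delete_spec : Claim_equal_cat_ranges_for_delete := by
  intro pc pn _
  unfold Spec_cat_ranges_for_delete cat_ranges_for_delete cat_ranges_for_delete_alt
  have hA := PySem.List.foldl_append_if (fun x => decide (x ∉ pn)) id
      (PySem.List.pyRange 1 (pc + 1)) []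
  simp only [decide_eq_true_eq, List.map_id, List.nil_append, id] at hA
  rw [hA]
  have hpw := PySem.List.sorted_ofList_pairwise_lt (xs := pn)
  rw [catLoop_eq_filter pc _ 1 hpw]
  apply List.filter_congr
  intro x _
  have hmem : x ∈ PySem.List.sorted (PySem.Set.ofList pn) (fun x => x) false ↔ x ∈ pn := by
    rw [PySem.List.mem_sorted, PySem.Set.mem_ofList]
  simp [hmem]
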